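-- pv_equiv track=rewrite | github.com/Rahoff/PythonCharacterGenerator | CharacterGenerator/lvladjust.py | featadj
-- ===== SOURCE A (Python) =====
-- def featadj(lvl, job, race):
--     bonusfeats = 0
--     start_feats = 1
--
--     if race == 'Human':
--         start_feats += 1
--
--     if job == 'Fighter':
--         start_feats += 1
--         for i in range(lvl):
--             if (i + 1) % 2 == 0:
--                 bonusfeats += 1
--     if job == 'Wizard':
--         for i in range(lvl):
--             if (i + 1) % 5 == 0:
--                 bonusfeats += 1
--
--     for i in range(lvl):
--         if (i + 1) % 3 == 0:
--             bonusfeats += 1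
--
--     return bonusfeats + start_feats
-- ===== SOURCE B (Python) =====
-- def featadj(lvl, job, race):
--     # closed-form: count of multiples of k in 1..n is n//k (empty range for lvl<=0)
--     n = max(lvl, 0)
--     start = 1 + (race == 'Human')
--     bonus = n // 3
--     if job == 'Fighter':
--         start += 1
--         bonus += n // 2
--     elif job == 'Wizard':
--         bonus += n // 5
--     return bonus + start
-- ===== Notes on version B (the rewrite author's own statement) =====
-- stated objective: faster
-- what changed: Replaces the three O(lvl) counting loops with closed-form floor divisions max(lvl,0)//2, //5, //3.
import Mathlib
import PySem

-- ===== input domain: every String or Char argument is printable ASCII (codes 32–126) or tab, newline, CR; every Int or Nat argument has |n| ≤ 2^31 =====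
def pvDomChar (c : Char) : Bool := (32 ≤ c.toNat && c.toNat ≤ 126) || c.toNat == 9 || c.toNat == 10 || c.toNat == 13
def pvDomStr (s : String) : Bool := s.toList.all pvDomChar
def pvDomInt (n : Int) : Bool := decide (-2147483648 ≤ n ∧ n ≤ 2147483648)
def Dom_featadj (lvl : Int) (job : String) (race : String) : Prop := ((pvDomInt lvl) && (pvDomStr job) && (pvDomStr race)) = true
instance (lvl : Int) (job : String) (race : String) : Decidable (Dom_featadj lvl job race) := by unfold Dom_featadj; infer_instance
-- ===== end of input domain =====

-- B replaces A's three O(lvl) counting loops by closed-form floor divisions (O(1)).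

-- ===== PORT A =====
def featadj (lvl : Int) (job : String) (race : String) : Int :=
  let bonusfeats : Int := 0
  let start_feats : Int := 1
  let start_feats := if race == "Human" then start_feats + 1 else start_feats
  let p :=
    if job == "Fighter" then
      (((PySem.List.pyRange 0 lvl 1).foldl
          (fun b i => if PySem.Int.mod (i + 1) 2 == 0 then b + 1 else b) bonusfeats),
        start_feats + 1)
    else (bonusfeats, start_feats)
  let bonusfeats := p.1
  let start_feats := p.2
  let bonusfeats :=
    if job == "Wizard" then
      (PySem.List.pyRange 0 lvl 1).foldl
        (fun b i => if PySem.Int.mod (i + 1) 5 == 0 then b + 1 else b) bonusfeats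
    else bonusfeats
  let bonusfeats :=
    (PySem.List.pyRange 0 lvl 1).foldl
      (fun b i => if PySem.Int.mod (i + 1) 3 == 0 then b + 1 else b) bonusfeats
  bonusfeats + start_feats

-- ===== PORT B =====
def featadj_alt (lvl : Int) (job : String) (race : String) : Int :=
  let n := max lvl 0
  let start : Int := 1 + (if race == "Human" then 1 else 0)
  let bonus := PySem.Int.floordiv n 3
  let p :=
    if job == "Fighter" then (start + 1, bonus + PySem.Int.floordiv n 2)
    else if job == "Wizard" then (start, bonus + PySem.Int.floordiv n 5)
    else (start, bonus)
  p.2 + p.1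

-- ===== PRECONDITION & SPEC =====
def Spec_featadj (lvl : Int) (job : String) (race : String) (out : Int) : Prop := out = featadj_alt lvl job race
instance (lvl : Int) (job : String) (race : String) (out : Int) : Decidable (Spec_featadj lvl job race out) := by unfold Spec_featadj; infer_instance

-- ===== CLAIM (what is proved, stated in full; the proofs are below) =====
def Claim_equal_featadj : Prop := ∀ (lvl : Int) (job : String) (race : String), Dom_featadj lvl job race → Spec_featadj lvl job race (featadj lvl job race)

-- ===== LEMMAS AND PROOFS =====

-- counting multiples of kn among 1..n by a fold equals n / kn
lemma count_mult_range (kn : Nat) (n : Nat) (c : Int) :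
    ((List.range n).map (fun (j : Nat) => (0 : Int) + (j : Int))).foldl
      (fun b i => if PySem.Int.mod (i + 1) (kn : Int) == 0 then b + 1 else b) c
    = c + ((n / kn : Nat) : Int) := by
  induction n generalizing c with
  | zero => simp
  | succ m ih =>
    rw [List.range_succ, List.map_append, List.foldl_append, ih]
    have hcast : ((0 : Int) + (m : Int)) + 1 = (((m + 1 : Nat) : Int)) := by push_cast; ring
    have hmod : PySem.Int.mod (((m + 1 : Nat) : Int)) ((kn : Nat) : Int)
        = (((m + 1) % kn : Nat) : Int) := PySem.Int.mod_natCast _ _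
    have hdiv : (m + 1) / kn = m / kn + if kn ∣ (m + 1) then 1 else 0 := Nat.succ_div
    simp only [List.map_cons, List.map_nil, List.foldl_cons, List.foldl_nil, hcast, hmod]
    by_cases h : kn ∣ (m + 1)
    · have hz : (m + 1) % kn = 0 := Nat.mod_eq_zero_of_dvd h
      rw [hdiv, if_pos h]
      simp [hz]
      ring
    · have hz : (m + 1) % kn ≠ 0 := fun hz0 => h (Nat.dvd_of_mod_eq_zero hz0)
      rw [hdiv, if_neg h]
      have hd : ¬((kn : Int) ∣ ((m : Int) + 1)) := by
        exact_mod_cast h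
      simp [hd]

lemma count_loop (kn : Nat) (lvl c : Int) :
    (PySem.List.pyRange 0 lvl 1).foldl
      (fun b i => if PySem.Int.mod (i + 1) (kn : Int) == 0 then b + 1 else b) c
    = c + PySem.Int.floordiv (max lvl 0) (kn : Int) := by
  rw [PySem.List.pyRange_one]
  have h1 : (lvl - 0).toNat = lvl.toNat := by omega
  have h2 : max lvl 0 = ((lvl.toNat : Nat) : Int) := by omega
  rw [h1, h2, PySem.Int.floordiv_natCast]
  exact count_mult_range kn lvl.toNat c

-- ===== VERDICT (by name: the statement is the Claim_ definition above) =====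
theorem featadj_spec : Claim_equal_featadj := by
  intro lvl job race _
  unfold Spec_featadj featadj featadj_alt
  have h2 := count_loop 2 lvl 0
  have h5f := fun c => count_loop 5 lvl c
  have h3f := fun c => count_loop 3 lvl c
  push_cast at h2 h5f h3f
  split_ifs <;> simp only [h2, h5f, h3f]
  all_goals try (rename_i hF hW; exact absurd ((eq_of_beq hF).symm.trans (eq_of_beq hW)) (by decide))
  all_goals ring
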